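-- pv_equiv track=rewrite | github.com/psycoleptic/Python_class | Funk Task 6.py | arifm
-- ===== SOURCE A (Python) =====
-- def arifm(n, d =1):
--     a1 = 1
--     an = 0
--     i = 1
--     while i <= n:
--         an = a1 + (i-1)*d
--         i += 1
--     return an
-- ===== SOURCE B (Python) =====
-- def arifm(n, d=1):
--     # closed form of the arithmetic progression (first term 1); A's loop
--     # leaves an = 0 when it never runs (n < 1)
--     return 1 + (n - 1) * d if n >= 1 else 0
-- ===== Notes on version B (the rewrite author's own statement) =====
-- stated objective: faster
-- what changed: Replaced the O(n) while-loop (which only keeps its last iteration's value) with the closed-form 1+(n-1)*d for n>=1, and 0 otherwise.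
import Mathlib
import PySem

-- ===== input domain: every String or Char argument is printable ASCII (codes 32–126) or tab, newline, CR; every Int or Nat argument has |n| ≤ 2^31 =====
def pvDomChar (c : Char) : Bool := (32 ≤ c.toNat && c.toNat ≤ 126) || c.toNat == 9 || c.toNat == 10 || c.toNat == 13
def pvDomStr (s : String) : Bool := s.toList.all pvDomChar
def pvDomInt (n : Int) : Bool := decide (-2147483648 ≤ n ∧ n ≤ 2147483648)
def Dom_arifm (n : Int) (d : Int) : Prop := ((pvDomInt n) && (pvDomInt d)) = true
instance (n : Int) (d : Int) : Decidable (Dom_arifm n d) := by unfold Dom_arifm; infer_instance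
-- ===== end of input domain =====

-- B replaces A's O(n) while-loop by the closed form 1+(n-1)*d (0 when n < 1): faster (asymptotic).

-- ===== PORT A =====
-- while i <= n: an = a1 + (i-1)*d; i += 1   (a1 = 1, an = 0, i = 1 initially)
def arifmLoop (n : Int) (d : Int) (i : Int) (an : Int) : Int :=
  if _h : i ≤ n then arifmLoop n d (i + 1) (1 + (i - 1) * d) else an
termination_by (n + 1 - i).toNat
decreasing_by omega

def arifm (n : Int) (d : Int) : Int := arifmLoop n d 1 0

-- ===== PORT B =====
def arifm_alt (n : Int) (d : Int) : Int := if n ≥ 1 then 1 + (n - 1) * d else 0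

-- ===== PRECONDITION & SPEC =====
def Spec_arifm (n : Int) (d : Int) (out : Int) : Prop := out = arifm_alt n d
instance (n : Int) (d : Int) (out : Int) : Decidable (Spec_arifm n d out) := by unfold Spec_arifm; infer_instance

-- ===== CLAIM (what is proved, stated in full; the proofs are below) =====
def Claim_equal_arifm : Prop := ∀ (n : Int) (d : Int), Dom_arifm n d → Spec_arifm n d (arifm n d)

-- ===== LEMMAS AND PROOFS =====
theorem arifmLoop_eq (n d : Int) : ∀ (k : ℕ) (i an : Int), (n + 1 - i).toNat = k →
    arifmLoop n d i an = if i ≤ n then 1 + (n - 1) * d else an := by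
  intro k
  induction k with
  | zero =>
    intro i an hk
    rw [arifmLoop]
    have : ¬ i ≤ n := by omega
    simp [this]
  | succ m ih =>
    intro i an hk
    rw [arifmLoop]
    by_cases h : i ≤ n
    · simp only [h, dif_pos, if_pos]
      rw [ih (i + 1) (1 + (i - 1) * d) (by omega)]
      by_cases h2 : i + 1 ≤ n
      · simp [h2]
      · have : i = n := by omega
        simp [this]
    · simp [h]

-- ===== VERDICT (by name: the statement is the Claim_ definition above) =====
theorem arifm_spec : Claim_equal_arifm := by
  intro n d _
  unfold Spec_arifm arifm arifm_alt
  rw [arifmLoop_eq n d (n + 1 - 1).toNat 1 0 rfl]
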